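-- pv_equiv track=rewrite | github.com/your-mistletoe/Algorithm | 프로그래머스/lv2/42578. 위장/위장.py | solution
-- ===== SOURCE A (Python) =====
-- def solution(clothes):
--     answer = 1
--     closet = {}
--
--     for i, c in clothes:
--         if c not in closet:
--             closet[c] = []
--         closet[c].append(i)
--
--     for key in closet.keys():
--         answer *= len(closet[key]) + 1
--
--     return answer - 1
-- ===== SOURCE B (Python) =====
-- def solution(clothes):
--     cats = sorted(c for _, c in clothes)
--     ans = 1
--     prev = None
--     run = 0
--     for c in cats:
--         if c == prev:
--             run += 1
--         else:
--             ans *= run + 1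
--             prev = c
--             run = 1
--     return ans * (run + 1) - 1
-- ===== Notes on version B (the rewrite author's own statement) =====
-- stated objective: alternative
-- what changed: Replaces A's dict-grouping (build category->items dict, then multiply len+1 over keys) with sort-then-scan: sort the category list and make one pass multiplying in (run length + 1) at each category change.
import Mathlib
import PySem

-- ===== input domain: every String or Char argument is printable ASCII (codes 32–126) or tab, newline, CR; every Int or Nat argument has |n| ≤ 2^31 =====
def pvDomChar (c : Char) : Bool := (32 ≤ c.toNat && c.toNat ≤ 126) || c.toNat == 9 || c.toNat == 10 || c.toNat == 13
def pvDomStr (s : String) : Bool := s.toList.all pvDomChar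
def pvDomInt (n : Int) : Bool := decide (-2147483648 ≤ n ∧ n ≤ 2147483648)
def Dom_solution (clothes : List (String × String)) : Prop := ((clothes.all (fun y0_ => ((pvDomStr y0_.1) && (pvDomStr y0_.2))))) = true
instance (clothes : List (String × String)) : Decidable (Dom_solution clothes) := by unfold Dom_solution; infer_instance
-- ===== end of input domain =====

-- B replaces A's dict-grouping with sort-then-count-consecutive-runs (alternative decomposition, same cost class).

-- ===== PORT A =====
-- body of A's first loop: if c not in closet: closet[c] = [] ; closet[c].append(i)
def aStep (closet : PySem.Dict String (List String)) (ic : String × String) : PySem.Dict String (List String) :=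
  let closet := if closet.contains ic.2 then closet else closet.insert ic.2 []
  closet.modify ic.2 [] (fun l => l ++ [ic.1])

def solution (clothes : List (String × String)) : Int :=
  let closet := clothes.foldl aStep PySem.Dict.empty
  let answer := closet.keys.foldl (fun answer key => answer * (PySem.List.len (closet.getD key []) + 1)) (1 : Int)
  answer - 1

-- ===== PORT B =====
-- body of B's loop over the sorted category list; state = (ans, prev, run)
def bStep (st : Int × Option String × Int) (c : String) : Int × Option String × Int :=
  if some c == st.2.1 then (st.1, st.2.1, st.2.2 + 1)
  else (st.1 * (st.2.2 + 1), some c, 1)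

def solution_alt (clothes : List (String × String)) : Int :=
  let cats := PySem.List.sorted (clothes.map (fun p => p.2)) (fun x => x) false
  let st := cats.foldl bStep ((1 : Int), (none : Option String), (0 : Int))
  st.1 * (st.2.2 + 1) - 1

-- ===== PRECONDITION & SPEC =====
def Spec_solution (clothes : List (String × String)) (out : Int) : Prop := out = solution_alt clothes
instance (clothes : List (String × String)) (out : Int) : Decidable (Spec_solution clothes out) := by unfold Spec_solution; infer_instance

-- ===== CLAIM (what is proved, stated in full; the proofs are below) =====
def Claim_equal_solution : Prop := ∀ (clothes : List (String × String)), Dom_solution clothes → Spec_solution clothes (solution clothes)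

-- ===== LEMMAS AND PROOFS =====

-- the common value both programs compute, plus one: ∏ over distinct categories of (count + 1)
def catProd (l : List String) : Int := ∏ x ∈ l.toFinset, ((l.count x : Int) + 1)

theorem catProd_perm (l l' : List String) (h : l.Perm l') : catProd l = catProd l' := by
  unfold catProd
  have hf : l.toFinset = l'.toFinset := by
    apply Finset.ext; intro a; simp [List.mem_toFinset, h.mem_iff]
  rw [hf]
  exact Finset.prod_congr rfl (fun x _ => by rw [h.count_eq])

-- ---- A side ----

theorem aStep_keys (d : PySem.Dict String (List String)) (ic : String × String) :
    (aStep d ic).keys = PySem.Set.add d.keys ic.2 := by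
  unfold aStep
  by_cases h : d.contains ic.2 = true
  · rw [if_pos h, PySem.Dict.keys_modify, PySem.Dict.keys_insert_of_contains _ _ h]
    have hm : ic.2 ∈ d.keys := (PySem.Dict.contains_iff_mem_keys d ic.2).1 h
    simp [PySem.Set.add, PySem.Set.contains, hm]
  · have h' : d.contains ic.2 = false := by simpa using h
    rw [if_neg (by simp [h']), PySem.Dict.keys_modify,
        PySem.Dict.keys_insert_of_contains _ _ (PySem.Dict.contains_insert_self d ic.2 []),
        PySem.Dict.keys_insert_of_not_contains _ _ h']
    have hm : ic.2 ∉ d.keys := fun hm => by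
      simp [(PySem.Dict.contains_iff_mem_keys d ic.2).2 hm] at h'
    simp [PySem.Set.add, PySem.Set.contains, hm]

theorem aStep_getD (d : PySem.Dict String (List String)) (ic : String × String) (c : String) :
    (aStep d ic).getD c [] = if c = ic.2 then d.getD ic.2 [] ++ [ic.1] else d.getD c [] := by
  unfold aStep
  by_cases h : d.contains ic.2 = true
  · simp only [h, if_true]
    rw [PySem.Dict.getD_modify]
  · have h' : d.contains ic.2 = false := by simpa using h
    simp only [h', if_false, Bool.false_eq_true]
    rw [PySem.Dict.getD_modify]
    by_cases hc : c = ic.2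
    · subst hc
      simp [PySem.Dict.getD_insert_self, PySem.Dict.getD_of_not_contains d _ h']
    · simp [hc, PySem.Dict.getD_insert_of_ne d _ _ hc]

theorem foldA_keys (l : List (String × String)) (d : PySem.Dict String (List String)) :
    (l.foldl aStep d).keys = PySem.Set.update d.keys (l.map (fun p => p.2)) := by
  induction l generalizing d with
  | nil => simp [PySem.Set.update_nil]
  | cons p l ih =>
      simp only [List.foldl_cons, List.map_cons, PySem.Set.update_cons]
      rw [ih, aStep_keys]

theorem foldA_getD (l : List (String × String)) (d : PySem.Dict String (List String)) (c : String) :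
    (l.foldl aStep d).getD c [] = d.getD c [] ++ (l.filter (fun p => p.2 == c)).map (fun p => p.1) := by
  induction l generalizing d with
  | nil => simp
  | cons p l ih =>
      simp only [List.foldl_cons]
      rw [ih, aStep_getD]
      by_cases hc : c = p.2
      · subst hc
        simp [List.append_assoc]
      · have : (p.2 == c) = false := by simpa using fun h => hc h.symm
        simp [this, hc]

theorem filter_len_count (l : List (String × String)) (c : String) :
    ((l.filter (fun p => p.2 == c)).map (fun p => p.1)).length = (l.map (fun p => p.2)).count c := by
  simp [List.count, List.countP_map, Function.comp_def, ← List.countP_eq_length_filter]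

theorem foldl_mul_prod (ks : List String) (f : String → Int) (a : Int) :
    ks.foldl (fun acc k => acc * f k) a = a * (ks.map f).prod := by
  induction ks generalizing a with
  | nil => simp
  | cons k ks ih => simp [List.foldl_cons, ih, mul_assoc]

theorem solution_eq_catProd (clothes : List (String × String)) :
    solution clothes = catProd (clothes.map (fun p => p.2)) - 1 := by
  unfold solution
  set cats := clothes.map (fun p => p.2) with hcats
  have hkeys : (clothes.foldl aStep PySem.Dict.empty).keys = PySem.Set.ofList cats := by
    rw [foldA_keys]
    rw [PySem.Set.ofList_eq_foldl]
    simp [PySem.Dict.keys_empty, PySem.Set.update]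
    rfl
  have hfold :
      (clothes.foldl aStep PySem.Dict.empty).keys.foldl
        (fun answer key => answer * (PySem.List.len ((clothes.foldl aStep PySem.Dict.empty).getD key []) + 1)) (1 : Int)
      = (PySem.Set.ofList cats).foldl (fun answer key => answer * ((cats.count key : Int) + 1)) (1 : Int) := by
    rw [hkeys]
    apply PySem.List.foldl_congr_mem
    intro acc x _
    rw [foldA_getD, PySem.Dict.getD_empty, List.nil_append, PySem.List.len_eq, filter_len_count]
  change List.foldl (fun answer key => answer * (PySem.List.len ((List.foldl aStep PySem.Dict.empty clothes).getD key []) + 1)) (1 : Int) (List.foldl aStep PySem.Dict.empty clothes).keys - 1 = catProd cats - 1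
  rw [hfold, foldl_mul_prod]
  have hnd : (PySem.Set.ofList cats).Nodup := PySem.Set.nodup_ofList cats
  have htf : (PySem.Set.ofList cats).toFinset = cats.toFinset := by
    apply Finset.ext; intro a; simp [List.mem_toFinset, PySem.Set.mem_ofList]
  unfold catProd
  rw [← htf, List.prod_toFinset _ hnd]
  ring

-- ---- B side ----

theorem run_fold (t : List String) (hs : t.Pairwise (· ≤ ·)) (p : String)
    (hp : ∀ x ∈ t, p ≤ x) (a r : Int) :
    (t.foldl bStep (a, some p, r)).1 * ((t.foldl bStep (a, some p, r)).2.2 + 1)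
      = a * (r + (t.count p : Int) + 1) * ∏ x ∈ t.toFinset.erase p, ((t.count x : Int) + 1) := by
  induction t generalizing p a r with
  | nil => simp
  | cons c t ih =>
      have hs' : t.Pairwise (· ≤ ·) := hs.tail
      have hc : ∀ x ∈ t, c ≤ x := fun x hx => (List.pairwise_cons.1 hs).1 x hx
      by_cases hcp : c = p
      · subst hcp
        have hstep : bStep (a, some c, r) c = (a, some c, r + 1) := by
          simp [bStep]
        simp only [List.foldl_cons, hstep]
        rw [ih hs' c hc a (r + 1)]
        have h1 : ((c :: t).count c : Int) = (t.count c : Int) + 1 := by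
          rw [List.count_cons_self]; push_cast; ring
        have h2 : (c :: t).toFinset.erase c = t.toFinset.erase c := by
          simp [List.toFinset_cons, Finset.erase_insert_eq_erase]
        have h3 : ∏ x ∈ t.toFinset.erase c, ((t.count x : Int) + 1)
            = ∏ x ∈ (c :: t).toFinset.erase c, (((c :: t).count x : Int) + 1) := by
          rw [h2]
          apply Finset.prod_congr rfl
          intro x hx
          rw [List.count_cons_of_ne (Ne.symm (Finset.ne_of_mem_erase hx))]
        rw [h3, h1]
        ring
      · have hplt : p < c := lt_of_le_of_ne (hp c (by simp)) (fun h => hcp h.symm)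
        have hpt : p ∉ (c :: t) := by
          intro hm
          rcases List.mem_cons.1 hm with h | h
          · exact hcp h.symm
          · exact absurd (lt_of_lt_of_le hplt (hc p h)) (lt_irrefl p)
        have hcount0 : (c :: t).count p = 0 := List.count_eq_zero.2 hpt
        have hstep : bStep (a, some p, r) c = (a * (r + 1), some c, 1) := by
          have : (c == p) = false := by simpa using hcp
          simp [bStep, this]
        simp only [List.foldl_cons, hstep]
        rw [ih hs' c hc (a * (r + 1)) 1]
        have herase_p : (c :: t).toFinset.erase p = (c :: t).toFinset :=
          Finset.erase_eq_self.mpr (by simpa using hpt)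
        have hcin : c ∈ (c :: t).toFinset := by simp
        have hsplit : ∏ x ∈ (c :: t).toFinset, (((c :: t).count x : Int) + 1)
            = (((c :: t).count c : Int) + 1) * ∏ x ∈ (c :: t).toFinset.erase c, (((c :: t).count x : Int) + 1) :=
          (Finset.mul_prod_erase _ _ hcin).symm
        have h2 : (c :: t).toFinset.erase c = t.toFinset.erase c := by
          simp [List.toFinset_cons, Finset.erase_insert_eq_erase]
        have h3 : ∏ x ∈ (c :: t).toFinset.erase c, (((c :: t).count x : Int) + 1)
            = ∏ x ∈ t.toFinset.erase c, ((t.count x : Int) + 1) := by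
          rw [h2]
          apply Finset.prod_congr rfl
          intro x hx
          rw [List.count_cons_of_ne (Ne.symm (Finset.ne_of_mem_erase hx))]
        have h4 : ((c :: t).count c : Int) = (t.count c : Int) + 1 := by
          rw [List.count_cons_self]; push_cast; ring
        rw [hcount0, herase_p, hsplit, h3, h4]
        push_cast
        ring

theorem solution_alt_eq_catProd (clothes : List (String × String)) :
    solution_alt clothes = catProd (clothes.map (fun p => p.2)) - 1 := by
  unfold solution_alt
  set cats := clothes.map (fun p => p.2) with hcats
  have hperm : (PySem.List.sorted cats (fun x => x) false).Perm cats :=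
    PySem.List.sorted_perm cats (fun x => x) false
  rw [show catProd cats = catProd (PySem.List.sorted cats (fun x => x) false) from
    (catProd_perm _ _ hperm).symm]
  cases hS : PySem.List.sorted cats (fun x => x) false with
  | nil => simp [catProd]
  | cons c t =>
      have hsp : (c :: t).Pairwise (· ≤ ·) := by
        have := PySem.List.sorted_pairwise cats (fun x => x)
        rw [hS] at this
        exact this
      have hstep : bStep ((1 : Int), (none : Option String), (0 : Int)) c
          = ((1 : Int) * (0 + 1), some c, (1 : Int)) := by
        simp [bStep]
      simp only [List.foldl_cons, hstep]
      rw [run_fold t hsp.tail c (fun x hx => (List.pairwise_cons.1 hsp).1 x hx) (1 * (0 + 1)) 1]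
      unfold catProd
      have hcin : c ∈ (c :: t).toFinset := by simp
      rw [← Finset.mul_prod_erase _ _ hcin]
      have h2 : (c :: t).toFinset.erase c = t.toFinset.erase c := by
        simp [List.toFinset_cons, Finset.erase_insert_eq_erase]
      have h3 : ∏ x ∈ (c :: t).toFinset.erase c, (((c :: t).count x : Int) + 1)
          = ∏ x ∈ t.toFinset.erase c, ((t.count x : Int) + 1) := by
        rw [h2]
        apply Finset.prod_congr rfl
        intro x hx
        rw [List.count_cons_of_ne (Ne.symm (Finset.ne_of_mem_erase hx))]
      have h4 : ((c :: t).count c : Int) = (t.count c : Int) + 1 := by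
        rw [List.count_cons_self]; push_cast; ring
      rw [h3, h4]
      ring

-- ===== VERDICT (by name: the statement is the Claim_ definition above) =====
theorem solution_spec : Claim_equal_solution := by
  intro clothes _
  unfold Spec_solution
  rw [solution_eq_catProd, solution_alt_eq_catProd]
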